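-- pv_equiv track=rewrite | github.com/SanaeMio/Bangumi-syncer | app/utils/bangumi_api.py | _match_target_ep_rows
-- ===== SOURCE A (Python) =====
-- def _match_target_ep_rows(ep_info: list, target_ep: int):
--     """与 target_season>1 分支一致的章节匹配规则。"""
--     rows = [i for i in ep_info if i.get("sort") == target_ep]
--     if not rows:
--         rows = [
--             i
--             for i in ep_info
--             if i.get("ep") == target_ep and i.get("ep", 0) <= i.get("sort", 0)
--         ]
--     return rows
-- ===== SOURCE B (Python) =====
-- def _match_target_ep_rows(ep_info: list, target_ep: int):
--     """Rank-and-select: score every row with a priority (1 = 'sort' match,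
--     2 = 'ep' fallback match, 0 = no match), then return the rows carrying
--     the best (smallest nonzero) priority present."""
--     def rank(i):
--         if i.get("sort") == target_ep:
--             return 1
--         if i.get("ep") == target_ep and i.get("ep", 0) <= i.get("sort", 0):
--             return 2
--         return 0
--     ranks = [rank(i) for i in ep_info]
--     hits = [r for r in ranks if r]
--     if not hits:
--         return []
--     best = min(hits)
--     return [i for i, r in zip(ep_info, ranks) if r == best]
-- ===== Notes on version B (the rewrite author's own statement) =====
-- stated objective: alternative
-- what changed: B scores each row with a priority (1 for a 'sort' match, 2 for an 'ep' fallback match, 0 otherwise), takes the minimum nonzero priority present, and selects the rows with that priority — a rank-and-select algorithm instead of A's filter-then-conditional-fallback-filter.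
import Mathlib
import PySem

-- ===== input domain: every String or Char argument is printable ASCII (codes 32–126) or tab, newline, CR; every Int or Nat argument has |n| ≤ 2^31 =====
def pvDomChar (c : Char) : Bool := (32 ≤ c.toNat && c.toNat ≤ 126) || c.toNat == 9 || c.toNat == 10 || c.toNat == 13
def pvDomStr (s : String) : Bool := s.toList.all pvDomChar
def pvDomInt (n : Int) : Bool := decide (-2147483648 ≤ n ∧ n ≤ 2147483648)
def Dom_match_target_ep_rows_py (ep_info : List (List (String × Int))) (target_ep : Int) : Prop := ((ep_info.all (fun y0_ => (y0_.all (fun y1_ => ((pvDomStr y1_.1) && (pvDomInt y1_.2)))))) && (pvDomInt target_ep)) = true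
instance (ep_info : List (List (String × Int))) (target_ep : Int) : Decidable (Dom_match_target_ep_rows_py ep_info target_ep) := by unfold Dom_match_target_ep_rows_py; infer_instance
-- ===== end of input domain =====

-- B re-derives the result by rank-and-select (score rows 1/2/0, pick rows of the minimal
-- nonzero score) instead of A's filter-then-conditional-fallback-filter; return value proved equal on Dom.
-- ===== PORT A =====
def pvSortHit (target_ep : Int) (i : List (String × Int)) : Bool :=
  (PySem.Dict.get? (PySem.Dict.mk i) "sort") == some target_ep

def pvEpHit (target_ep : Int) (i : List (String × Int)) : Bool :=
  ((PySem.Dict.get? (PySem.Dict.mk i) "ep") == some target_ep)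
    && decide (PySem.Dict.getD (PySem.Dict.mk i) "ep" 0 ≤ PySem.Dict.getD (PySem.Dict.mk i) "sort" 0)

def match_target_ep_rows_py (ep_info : List (List (String × Int))) (target_ep : Int) : List (List (String × Int)) :=
  let rows := ep_info.filter (pvSortHit target_ep)
  if rows.isEmpty then ep_info.filter (pvEpHit target_ep) else rows

-- ===== PORT B =====
def pvRank (target_ep : Int) (i : List (String × Int)) : Int :=
  if (PySem.Dict.get? (PySem.Dict.mk i) "sort") == some target_ep then 1
  else if ((PySem.Dict.get? (PySem.Dict.mk i) "ep") == some target_ep)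
            && decide (PySem.Dict.getD (PySem.Dict.mk i) "ep" 0 ≤ PySem.Dict.getD (PySem.Dict.mk i) "sort" 0) then 2
  else 0

def match_target_ep_rows_py_alt (ep_info : List (List (String × Int))) (target_ep : Int) : List (List (String × Int)) :=
  let ranks := ep_info.map (pvRank target_ep)
  let hits := ranks.filter (fun r => r != 0)
  match PySem.List.min? hits (fun x => x) with
  | none => []
  | some best => ((ep_info.zip ranks).filter (fun p => p.2 == best)).map Prod.fst

-- ===== PRECONDITION & SPEC =====
def Spec_match_target_ep_rows_py (ep_info : List (List (String × Int))) (target_ep : Int) (out : List (List (String × Int))) : Prop := out = match_target_ep_rows_py_alt ep_info target_ep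
instance (ep_info : List (List (String × Int))) (target_ep : Int) (out : List (List (String × Int))) : Decidable (Spec_match_target_ep_rows_py ep_info target_ep out) := by unfold Spec_match_target_ep_rows_py; infer_instance

-- ===== CLAIM =====
def Claim_equal_match_target_ep_rows_py : Prop := ∀ (ep_info : List (List (String × Int))) (target_ep : Int), Dom_match_target_ep_rows_py ep_info target_ep → Spec_match_target_ep_rows_py ep_info target_ep (match_target_ep_rows_py ep_info target_ep)

-- ===== LEMMAS AND PROOFS =====
theorem pvRank_one {te : Int} {i : List (String × Int)} (h : pvSortHit te i = true) :
    pvRank te i = 1 := by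
  unfold pvRank; unfold pvSortHit at h; simp [h]

theorem pvRank_not_sort {te : Int} {i : List (String × Int)} (h : pvSortHit te i = false) :
    pvRank te i = if pvEpHit te i then 2 else 0 := by
  unfold pvRank pvEpHit; unfold pvSortHit at h; simp [h]

theorem pvRank_cases (te : Int) (i : List (String × Int)) :
    pvRank te i = 0 ∨ pvRank te i = 1 ∨ pvRank te i = 2 := by
  unfold pvRank; split_ifs <;> simp

theorem pvSelect {α : Type} (f : α → Int) (b : Int) (l : List α) :
    ((l.zip (l.map f)).filter (fun p => p.2 == b)).map Prod.fst
      = l.filter (fun i => f i == b) := by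
  induction l with
  | nil => simp
  | cons x xs ih =>
    simp only [List.map_cons, List.zip_cons_cons, List.filter_cons]
    by_cases h : f x == b <;> simp [h, ih]

-- ===== VERDICT =====
theorem match_target_ep_rows_py_spec : Claim_equal_match_target_ep_rows_py := by
  intro l te _
  unfold Spec_match_target_ep_rows_py match_target_ep_rows_py match_target_ep_rows_py_alt
  by_cases hs : ∃ x ∈ l, pvSortHit te x = true
  · -- some sort match: the minimal nonzero rank is 1
    obtain ⟨x, hx, hsx⟩ := hs
    have h1 : (1 : Int) ∈ (l.map (pvRank te)).filter (fun r => r != 0) := by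
      refine List.mem_filter.mpr ⟨?_, by decide⟩
      exact List.mem_map.mpr ⟨x, hx, pvRank_one hsx⟩
    have hne : (l.map (pvRank te)).filter (fun r => r != 0) ≠ [] :=
      List.ne_nil_of_mem h1
    cases hmin : PySem.List.min? ((l.map (pvRank te)).filter (fun r => r != 0)) (fun x => x) with
    | none => exact absurd ((PySem.List.min?_eq_none_iff _ _).mp hmin) hne
    | some m =>
      have hle : m ≤ 1 := PySem.List.min?_isMin hmin 1 h1
      have hmem := PySem.List.min?_mem hmin
      obtain ⟨hmr, hm0⟩ := List.mem_filter.mp hmem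
      obtain ⟨y, _, hy⟩ := List.mem_map.mp hmr
      have hm1 : m = 1 := by
        rcases pvRank_cases te y with h | h | h <;> rw [hy] at h <;> simp [h] at hm0 ⊢ <;> omega
      subst hm1
      have hB : (match PySem.List.min? ((l.map (pvRank te)).filter (fun r => r != 0)) (fun x => x) with
          | none => ([] : List (List (String × Int)))
          | some best => ((l.zip (l.map (pvRank te))).filter (fun p => p.2 == best)).map Prod.fst)
          = ((l.zip (l.map (pvRank te))).filter (fun p => p.2 == (1 : Int))).map Prod.fst := by
        rw [hmin]
      rw [hB, pvSelect]
      have hfe : l.filter (fun i => pvRank te i == 1) = l.filter (pvSortHit te) := by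
        refine List.filter_congr ?_
        intro i _
        by_cases h : pvSortHit te i = true
        · simp [h, pvRank_one h]
        · have h' : pvSortHit te i = false := by simpa using h
          rw [pvRank_not_sort h', h']
          by_cases he : pvEpHit te i = true <;> simp [he]
      rw [hfe]
      have hnil : l.filter (pvSortHit te) ≠ [] := by
        intro hnil
        have := List.filter_eq_nil_iff.mp hnil x hx
        simp [hsx] at this
      simp [List.isEmpty_iff, hnil]
  · -- no sort match: ranks are 0 or 2, so either no hit ([]) or minimal rank 2
    have hs' : ∀ x ∈ l, pvSortHit te x = false := by
      intro x hx
      by_contra h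
      exact hs ⟨x, hx, by simpa using h⟩
    have hrows : l.filter (pvSortHit te) = [] :=
      List.filter_eq_nil_iff.mpr (by intro x hx; simp [hs' x hx])
    rw [hrows]
    simp only [List.isEmpty_nil, if_true]
    cases hmin : PySem.List.min? ((l.map (pvRank te)).filter (fun r => r != 0)) (fun x => x) with
    | none =>
      have hhits := (PySem.List.min?_eq_none_iff _ _).mp hmin
      have hep : ∀ x ∈ l, pvEpHit te x = false := by
        intro x hx
        by_contra h
        have he : pvEpHit te x = true := by simpa using h
        have : (2 : Int) ∈ (l.map (pvRank te)).filter (fun r => r != 0) := by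
          refine List.mem_filter.mpr ⟨?_, by decide⟩
          refine List.mem_map.mpr ⟨x, hx, ?_⟩
          rw [pvRank_not_sort (hs' x hx), he]; rfl
        rw [hhits] at this
        simp at this
      exact List.filter_eq_nil_iff.mpr (by intro x hx; simp [hep x hx])
    | some m =>
      have hmem := PySem.List.min?_mem hmin
      obtain ⟨hmr, hm0⟩ := List.mem_filter.mp hmem
      obtain ⟨y, hyl, hy⟩ := List.mem_map.mp hmr
      have hm2 : m = 2 := by
        rw [pvRank_not_sort (hs' y hyl)] at hy
        by_cases he : pvEpHit te y = true <;> simp [he] at hy <;> simp [← hy] at hm0 ⊢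
      subst hm2
      show List.filter (pvEpHit te) l = ((l.zip (l.map (pvRank te))).filter (fun p => p.2 == (2 : Int))).map Prod.fst
      rw [pvSelect]
      refine (List.filter_congr ?_).symm
      intro i hi
      rw [pvRank_not_sort (hs' i hi)]
      by_cases he : pvEpHit te i = true <;> simp [he]
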